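-- pv_equiv track=rewrite | github.com/dmac/adventofcode2024 | 02.py | safe_asc
-- ===== SOURCE A (Python) =====
-- def safe_asc(r, damped=False):
--     for i, _ in enumerate(r):
--         if i == 0:
--             continue
--         if r[i] <= r[i-1] or r[i] - r[i-1] > 3:
--             if damped:
--                 return False
--             return (safe_asc(r[:i-1] + r[i:], damped=True) or
--                     safe_asc(r[:i] + r[i+1:], damped=True))
--     return True
-- ===== SOURCE B (Python) =====
-- def ok(s):
--     return all(s[j] > s[j-1] and s[j] - s[j-1] <= 3 for j in range(1, len(s)))
--
--
-- def safe_asc(r, damped=False):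
--     if damped:
--         return ok(r)
--     return ok(r) or any(ok(r[:j] + r[j+1:]) for j in range(len(r)))
-- ===== Notes on version B (the rewrite author's own statement) =====
-- stated objective: simpler
-- what changed: Replaces A's find-first-violation recursion with a damped flag by a flat all-adjacent-pairs validity predicate ok plus a brute-force scan over every single-element removal; equivalent because only removing one of the two elements at the first violating pair can repair a list.
import Mathlib
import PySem

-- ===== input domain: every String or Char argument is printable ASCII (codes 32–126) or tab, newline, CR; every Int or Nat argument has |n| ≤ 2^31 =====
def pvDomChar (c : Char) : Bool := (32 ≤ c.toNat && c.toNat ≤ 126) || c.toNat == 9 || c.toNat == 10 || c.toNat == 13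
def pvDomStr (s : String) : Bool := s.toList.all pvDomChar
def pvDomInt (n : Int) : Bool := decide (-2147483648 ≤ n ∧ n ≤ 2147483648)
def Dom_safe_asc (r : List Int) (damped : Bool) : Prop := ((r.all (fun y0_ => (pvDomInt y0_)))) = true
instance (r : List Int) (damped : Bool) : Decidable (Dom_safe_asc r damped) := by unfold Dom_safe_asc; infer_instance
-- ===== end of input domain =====

-- B replaces A's first-violation recursion with a flat pair-validity predicate plus a
-- brute-force scan over all single-element removals (simpler; not faster).


-- ===== PORT A =====
-- A-side helper: the loop body's test  r[i] <= r[i-1] or r[i] - r[i-1] > 3  (indices in range on every use)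
def violA (r : List Int) (i : Int) : Bool :=
  decide (PySem.List.pyGetD r i 0 ≤ PySem.List.pyGetD r (i-1) 0)
  || decide (3 < PySem.List.pyGetD r i 0 - PySem.List.pyGetD r (i-1) 0)

-- A-side helper: A's 'for i, _ in enumerate(r)' loop with its early return = first element hit
def firstBad (r : List Int) : Option (Int × Int) :=
  (PySem.List.enumerate r 0).find? (fun p => decide (p.1 ≠ 0) && violA r p.1)

-- bounds of the found index, needed below for the port's termination proof
theorem enumerate_mem_bounds {α : Type} (xs : List α) (s : Int) (q : Int × α)
    (h : q ∈ PySem.List.enumerate xs s) : s ≤ q.1 ∧ q.1 < s + xs.length := by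
  induction xs generalizing s with
  | nil => simp [PySem.List.enumerate_nil] at h
  | cons x xs ih =>
    rw [PySem.List.enumerate_cons] at h
    rcases List.mem_cons.mp h with h1 | h2
    · subst h1
      show s ≤ s ∧ s < s + ((x :: xs).length : Int)
      simp only [List.length_cons]
      push_cast
      omega
    · have := ih (s+1) h2
      simp only [List.length_cons]
      push_cast at this ⊢
      omega

theorem firstBad_bounds (r : List Int) (p : Int × Int) (h : firstBad r = some p) :
    1 ≤ p.1 ∧ p.1 < (r.length : Int) := by
  have hm := List.mem_of_find?_eq_some h
  have hp := List.find?_some h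
  have hb := enumerate_mem_bounds r 0 p hm
  simp only [Bool.and_eq_true, decide_eq_true_eq] at hp
  omega

def safe_asc (r : List Int) (damped : Bool) : Bool :=
  match h : firstBad r with
  | none => true
  | some p =>
    if damped then false
    else
      safe_asc (PySem.List.slice r none (some (p.1 - 1)) ++ PySem.List.slice r (some p.1) none) true
      || safe_asc (PySem.List.slice r none (some p.1) ++ PySem.List.slice r (some (p.1 + 1)) none) true
termination_by r.length
decreasing_by
  · have hb := firstBad_bounds r p h
    rw [PySem.List.slice_to (b := p.1 - 1) r (by omega), PySem.List.slice_from (a := p.1) r (by omega)]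
    simp only [List.length_append, List.length_take, List.length_drop]
    omega
  · have hb := firstBad_bounds r p h
    rw [PySem.List.slice_to (b := p.1) r (by omega), PySem.List.slice_from (a := p.1 + 1) r (by omega)]
    simp only [List.length_append, List.length_take, List.length_drop]
    omega

-- ===== PORT B =====
-- B's helper ok(s): all adjacent pairs strictly ascend with gap ≤ 3
def okB (s : List Int) : Bool :=
  (PySem.List.pyRange 1 (s.length : Int) 1).all
    (fun j => decide (PySem.List.pyGetD s (j-1) 0 < PySem.List.pyGetD s j 0)
           && decide (PySem.List.pyGetD s j 0 - PySem.List.pyGetD s (j-1) 0 ≤ 3))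

def safe_asc_alt (r : List Int) (damped : Bool) : Bool :=
  if damped then okB r
  else okB r || (PySem.List.pyRange 0 (r.length : Int) 1).any
        (fun j => okB (PySem.List.slice r none (some j) ++ PySem.List.slice r (some (j+1)) none))

-- ===== PRECONDITION & SPEC =====
def Spec_safe_asc (r : List Int) (damped : Bool) (out : Bool) : Prop := out = safe_asc_alt r damped
instance (r : List Int) (damped : Bool) (out : Bool) : Decidable (Spec_safe_asc r damped out) := by unfold Spec_safe_asc; infer_instance

-- ===== CLAIM (what is proved, stated in full; the proofs are below) =====
def Claim_equal_safe_asc : Prop := ∀ (r : List Int) (damped : Bool), Dom_safe_asc r damped → Spec_safe_asc r damped (safe_asc r damped)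

-- ===== LEMMAS AND PROOFS =====

-- the pair (k, k+1) of r violates the ascend-with-gap-≤-3 condition (total getD form)
def badB (r : List Int) (k : Nat) : Bool :=
  decide (r.getD (k+1) 0 ≤ r.getD k 0) || decide (3 < r.getD (k+1) 0 - r.getD k 0)

theorem mem_enumerate_of_lt {α : Type} (xs : List α) (s : Int) (k : Nat) (hk : k < xs.length) :
    ((s + k : Int), xs[k]) ∈ PySem.List.enumerate xs s := by
  induction xs generalizing s k with
  | nil => simp at hk
  | cons x xs ih =>
    rw [PySem.List.enumerate_cons]
    cases k with
    | zero => simp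
    | succ k' =>
      have := ih (s+1) k' (by simpa using hk)
      have harith : (s + 1 + (k' : Int)) = s + ((k' + 1 : Nat) : Int) := by push_cast; ring
      rw [harith] at this
      exact List.mem_cons_of_mem _ this

theorem violA_natCast (r : List Int) (k : Nat) :
    violA r ((k+1 : Nat) : Int) = badB r k := by
  unfold violA badB
  have h1 : (((k+1 : Nat) : Int) - 1) = ((k : Nat) : Int) := by push_cast; ring
  rw [h1, PySem.List.pyGetD_natCast (n := k+1), PySem.List.pyGetD_natCast (n := k)]

theorem okPair_natCast (s : List Int) (k : Nat) :
    (decide (PySem.List.pyGetD s (((k+1:Nat):Int)-1) 0 < PySem.List.pyGetD s ((k+1:Nat):Int) 0)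
     && decide (PySem.List.pyGetD s ((k+1:Nat):Int) 0 - PySem.List.pyGetD s (((k+1:Nat):Int)-1) 0 ≤ 3))
    = !(badB s k) := by
  unfold badB
  have h1 : (((k+1 : Nat) : Int) - 1) = ((k : Nat) : Int) := by push_cast; ring
  rw [h1, PySem.List.pyGetD_natCast (n := k+1), PySem.List.pyGetD_natCast (n := k)]
  apply Bool.eq_iff_iff.mpr
  simp

theorem okB_iff (s : List Int) :
    okB s = true ↔ ∀ k : Nat, k + 1 < s.length → badB s k = false := by
  unfold okB
  rw [List.all_eq_true]
  constructor
  · intro h k hk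
    have hmem : ((k+1 : Nat) : Int) ∈ PySem.List.pyRange 1 (s.length : Int) 1 :=
      PySem.List.mem_pyRange_one.mpr ⟨by omega, by omega⟩
    have := h _ hmem
    rw [okPair_natCast] at this
    simpa using this
  · intro h j hj
    rw [PySem.List.mem_pyRange_one] at hj
    have hjk : j = (((j.toNat - 1) + 1 : Nat) : Int) := by omega
    rw [hjk, okPair_natCast]
    simp [h (j.toNat - 1) (by omega)]

theorem okB_false_of_bad (s : List Int) (k : Nat) (hk : k + 1 < s.length) (hb : badB s k = true) :
    okB s = false := by
  cases hok : okB s with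
  | false => rfl
  | true => rw [(okB_iff s).mp hok k hk] at hb; exact absurd hb (by simp)

theorem firstBad_none (r : List Int) (h : firstBad r = none) :
    ∀ k : Nat, k + 1 < r.length → badB r k = false := by
  intro k hk
  rw [firstBad, List.find?_eq_none] at h
  have hb := h _ (mem_enumerate_of_lt r 0 (k+1) hk)
  rw [Bool.not_eq_true] at hb
  have : (decide ((0 + ((k+1:Nat):Int)) ≠ 0) && violA r (0 + ((k+1:Nat):Int))) = false := hb
  rw [zero_add, violA_natCast, Bool.and_eq_false_iff] at this
  rcases this with h0 | h0
  · simp at h0; omega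
  · exact h0

theorem firstBad_some_bad (r : List Int) (p : Int × Int) (h : firstBad r = some p) :
    ∃ k : Nat, p.1 = ((k+1 : Nat) : Int) ∧ k + 1 < r.length ∧ badB r k = true := by
  have hb := firstBad_bounds r p h
  have hp := List.find?_some h
  rw [Bool.and_eq_true] at hp
  refine ⟨p.1.toNat - 1, by omega, by omega, ?_⟩
  have hcast : p.1 = (((p.1.toNat - 1) + 1 : Nat) : Int) := by omega
  rw [hcast, violA_natCast] at hp
  exact hp.2

theorem slice_erase (r : List Int) (j : Int) (hj : 0 ≤ j) :
    PySem.List.slice r none (some j) ++ PySem.List.slice r (some (j+1)) none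
      = r.eraseIdx j.toNat := by
  rw [PySem.List.slice_to (b := j) r hj, PySem.List.slice_from (a := j+1) r (by omega),
      List.eraseIdx_eq_take_drop_succ]
  have : (j+1).toNat = j.toNat + 1 := by omega
  rw [this]

theorem getD_erase_lt (r : List Int) (m t : Nat) (h : t < m) (ht : t < r.length) :
    (r.eraseIdx m).getD t 0 = r.getD t 0 := by
  have hlt : t < (r.eraseIdx m).length := by
    rw [List.length_eraseIdx]; split <;> omega
  rw [List.getD_eq_getElem _ _ hlt, List.getElem_eraseIdx, dif_pos h, List.getD_eq_getElem _ _ ht]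

theorem getD_erase_ge (r : List Int) (m t : Nat) (h : m ≤ t) (ht : t + 1 < r.length) :
    (r.eraseIdx m).getD t 0 = r.getD (t+1) 0 := by
  have hlt : t < (r.eraseIdx m).length := by
    rw [List.length_eraseIdx]; split <;> omega
  rw [List.getD_eq_getElem _ _ hlt, List.getElem_eraseIdx, dif_neg (by omega),
      List.getD_eq_getElem _ _ ht]

theorem okB_eraseIdx_false (r : List Int) (k m : Nat) (hk : k + 1 < r.length)
    (hbad : badB r k = true) (hm : m < r.length) (h1 : m ≠ k) (h2 : m ≠ k + 1) :
    okB (r.eraseIdx m) = false := by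
  have hlen : (r.eraseIdx m).length = r.length - 1 := by
    rw [List.length_eraseIdx]; split <;> omega
  rcases Nat.lt_or_ge m k with hmk | hmk
  · -- m < k: the bad pair sits at positions (k-1, k) of the shortened list
    apply okB_false_of_bad _ (k-1) (by omega)
    unfold badB
    unfold badB at hbad
    have hkk : k - 1 + 1 = k := by omega
    rw [hkk, getD_erase_ge r m k (by omega) (by omega),
        getD_erase_ge r m (k-1) (by omega) (by omega), hkk]
    exact hbad
  · -- m > k+1: the bad pair stays at positions (k, k+1)
    have hmk2 : k + 1 < m := by omega
    apply okB_false_of_bad _ k (by omega)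
    unfold badB
    unfold badB at hbad
    rw [getD_erase_lt r m (k+1) (by omega) (by omega), getD_erase_lt r m k (by omega) (by omega)]
    exact hbad

theorem any_removals (r : List Int) (k : Nat) (hk : k + 1 < r.length) (hbad : badB r k = true) :
    ((PySem.List.pyRange 0 (r.length : Int) 1).any
      (fun j => okB (PySem.List.slice r none (some j) ++ PySem.List.slice r (some (j+1)) none)))
    = (okB (r.eraseIdx k) || okB (r.eraseIdx (k+1))) := by
  apply Bool.eq_iff_iff.mpr
  rw [List.any_eq_true, Bool.or_eq_true]
  constructor
  · rintro ⟨j, hj, hok⟩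
    rw [PySem.List.mem_pyRange_one] at hj
    rw [slice_erase r j hj.1] at hok
    by_cases hjk : j.toNat = k
    · left; rwa [hjk] at hok
    · by_cases hjk1 : j.toNat = k + 1
      · right; rwa [hjk1] at hok
      · rw [okB_eraseIdx_false r k j.toNat hk hbad (by omega) hjk hjk1] at hok
        exact absurd hok (by simp)
  · rintro (hok | hok)
    · refine ⟨(k : Int), PySem.List.mem_pyRange_one.mpr ⟨by omega, by omega⟩, ?_⟩
      rw [slice_erase r _ (by omega)]
      simpa using hok
    · refine ⟨((k+1 : Nat) : Int), PySem.List.mem_pyRange_one.mpr ⟨by omega, by omega⟩, ?_⟩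
      rw [slice_erase r _ (by omega)]
      simpa using hok

theorem safe_asc_damped (r : List Int) : safe_asc r true = okB r := by
  rw [safe_asc]
  split
  next h =>
    exact ((okB_iff r).mpr (firstBad_none r h)).symm
  next p h =>
    obtain ⟨k, _, hk2, hk3⟩ := firstBad_some_bad r p h
    simp [okB_false_of_bad r k hk2 hk3]

-- ===== VERDICT (by name: the statement is the Claim_ definition above) =====
theorem safe_asc_spec : Claim_equal_safe_asc := by
  intro r damped _
  unfold Spec_safe_asc safe_asc_alt
  cases damped with
  | true => simp [safe_asc_damped]
  | false =>
    simp only [Bool.false_eq_true, if_false]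
    rw [safe_asc]
    split
    next h =>
      have : okB r = true := (okB_iff r).mpr (firstBad_none r h)
      simp [this]
    next p h =>
      simp only [Bool.false_eq_true, if_false]
      obtain ⟨k, hk1, hk2, hk3⟩ := firstBad_some_bad r p h
      have e1 : PySem.List.slice r none (some (p.1 - 1)) ++ PySem.List.slice r (some p.1) none
          = r.eraseIdx k := by
        have h1 : p.1 - 1 = ((k : Nat) : Int) := by omega
        have h2 : p.1 = ((k : Nat) : Int) + 1 := by omega
        rw [h1, h2, slice_erase r _ (by omega)]
        simp
      have e2 : PySem.List.slice r none (some p.1) ++ PySem.List.slice r (some (p.1 + 1)) none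
          = r.eraseIdx (k+1) := by
        have h2 : p.1 = (((k+1) : Nat) : Int) := by omega
        rw [h2, slice_erase r _ (by omega)]
        simp
      rw [e1, e2, safe_asc_damped, safe_asc_damped,
          okB_false_of_bad r k hk2 hk3, any_removals r k hk2 hk3]
      simp
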